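-- pv_equiv track=rewrite | github.com/estraier/tkrzw-dict | tkrzw_union_searcher.py | CramText
-- ===== SOURCE A (Python) =====
-- def CramText(text):
--   lines = []
--   last_line = ""
--   for line in text.split("\n"):
--     line = line.strip()
--     if line:
--       if last_line:
--         last_line += " "
--       last_line += line
--     elif last_line:
--       lines.append(last_line)
--       last_line = ""
--   if last_line:
--     lines.append(last_line)
--   text = "\n".join(lines)
--   return text
-- ===== SOURCE B (Python) =====
-- def CramText(text):
--   lines = [l.strip() for l in text.split("\n")]
--   paras = []
--   while lines:
--     if lines[0]:
--       k = 0
--       while k < len(lines) and lines[k]: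
--         k += 1
--       paras.append(" ".join(lines[:k]))
--       lines = lines[k:]
--     else:
--       lines = lines[1:]
--   return "\n".join(paras)
-- ===== Notes on version B (the rewrite author's own statement) =====
-- stated objective: simpler
-- what changed: Replaces A's running last_line accumulator with conditional space-appends and explicit end-of-loop flush by partitioning the stripped lines into maximal runs of nonblank lines and joining each run with single spaces into a paragraph.
import Mathlib
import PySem

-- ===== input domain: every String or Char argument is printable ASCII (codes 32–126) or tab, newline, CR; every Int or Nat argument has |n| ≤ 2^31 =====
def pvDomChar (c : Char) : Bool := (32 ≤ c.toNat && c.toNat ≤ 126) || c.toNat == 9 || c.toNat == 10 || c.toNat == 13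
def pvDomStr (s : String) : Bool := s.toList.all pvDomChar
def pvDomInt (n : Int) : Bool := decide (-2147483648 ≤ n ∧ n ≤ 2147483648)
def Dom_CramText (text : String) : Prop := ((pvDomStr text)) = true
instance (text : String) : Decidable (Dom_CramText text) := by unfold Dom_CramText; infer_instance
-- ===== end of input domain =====

-- B replaces A's running last_line accumulator and flush-at-end with a partition of the
-- stripped lines into runs of nonblank lines, each joined into a paragraph (objective: simpler).


-- ===== PORT A =====
-- A's loop body: state = (lines, last_line); the line is stripped, a nonblank line is
-- appended to last_line (with a separating space), a blank line flushes last_line.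
def cramStepA (st : List (List Char) × List Char) (line : List Char) : List (List Char) × List Char :=
  let line := PySem.Chars.strip line
  if line ≠ [] then
    (st.1, (if st.2 ≠ [] then st.2 ++ [' '] else st.2) ++ line)
  else if st.2 ≠ [] then (st.1 ++ [st.2], [])
  else st

def CramText (text : String) : String :=
  let st := (PySem.Chars.splitOn text.toList ['\n']).foldl cramStepA ([], [])
  let lines := if st.2 ≠ [] then st.1 ++ [st.2] else st.1
  String.ofList (PySem.Chars.join ['\n'] lines)

-- ===== PORT B =====
-- B's outer while loop: take the maximal run of nonblank lines (inner while + slices =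
-- takeWhile / dropWhile), join it into one paragraph, continue on the rest; skip a blank head.
def cramParas : List (List Char) → List (List Char)
  | [] => []
  | l :: ls =>
    if h : l ≠ [] then
      PySem.Chars.join [' '] ((l :: ls).takeWhile (· ≠ [])) ::
        cramParas ((l :: ls).dropWhile (· ≠ []))
    else cramParas ls
termination_by ls => ls.length
decreasing_by
  · simp only [List.dropWhile_cons, decide_eq_true h, if_true]
    exact Nat.lt_succ_of_le (List.length_dropWhile_le _ ls)
  · simp

def CramText_alt (text : String) : String :=
  String.ofList (PySem.Chars.join ['\n']
    (cramParas ((PySem.Chars.splitOn text.toList ['\n']).map PySem.Chars.strip)))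

-- ===== PRECONDITION & SPEC =====
def Spec_CramText (text : String) (out : String) : Prop := out = CramText_alt text
instance (text : String) (out : String) : Decidable (Spec_CramText text out) := by unfold Spec_CramText; infer_instance

-- ===== CLAIM (what is proved, stated in full; the proofs are below) =====
def Claim_equal_CramText : Prop := ∀ (text : String), Dom_CramText text → Spec_CramText text (CramText text)

-- ===== LEMMAS AND PROOFS =====

-- A's step on an already-stripped line
def cramStep (st : List (List Char) × List Char) (line : List Char) : List (List Char) × List Char :=
  if line ≠ [] then
    (st.1, (if st.2 ≠ [] then st.2 ++ [' '] else st.2) ++ line)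
  else if st.2 ≠ [] then (st.1 ++ [st.2], [])
  else st

theorem cramStep_ne (st : List (List Char) × List Char) (line : List Char) (h : line ≠ []) :
    cramStep st line = (st.1, (if st.2 ≠ [] then st.2 ++ [' '] else st.2) ++ line) := by
  simp [cramStep, h]

theorem cramStep_nil (st : List (List Char) × List Char) :
    cramStep st [] = if st.2 ≠ [] then (st.1 ++ [st.2], []) else st := by
  simp [cramStep]

theorem cramParas_cons_ne (l : List Char) (ls : List (List Char)) (h : l ≠ []) :
    cramParas (l :: ls) =
      PySem.Chars.join [' '] (l :: ls.takeWhile (· ≠ [])) ::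
        cramParas (ls.dropWhile (· ≠ [])) := by
  rw [cramParas]
  simp [h]

theorem cramParas_cons_nil (ls : List (List Char)) :
    cramParas ([] :: ls) = cramParas ls := by
  rw [cramParas]; simp

-- pre-joining the pending paragraph with the next nonblank line gives the same paragraphs
theorem cramParas_glue (last m : List Char) (ls : List (List Char))
    (hl : last ≠ []) (hm : m ≠ []) :
    cramParas ((last ++ ' ' :: m) :: ls) = cramParas (last :: m :: ls) := by
  have hlm : last ++ ' ' :: m ≠ [] := by simp
  rw [cramParas_cons_ne _ _ hlm, cramParas_cons_ne _ _ hl]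
  simp only [List.takeWhile_cons, List.dropWhile_cons, decide_eq_true hm, if_true]
  congr 1
  cases h : List.takeWhile (fun x => decide (x ≠ [])) ls with
  | nil => simp [PySem.Chars.join_cons_cons, PySem.Chars.join_singleton]
  | cons q rest =>
    rw [PySem.Chars.join_cons_cons, PySem.Chars.join_cons_cons, PySem.Chars.join_cons_cons]
    simp

def cramFinal (st : List (List Char) × List Char) : List (List Char) :=
  if st.2 ≠ [] then st.1 ++ [st.2] else st.1

def optCons (last : List Char) (ms : List (List Char)) : List (List Char) :=
  if last ≠ [] then last :: ms else ms

-- loop invariant: the flushed fold from state (acc, last) is acc followed by the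
-- paragraphs of the remaining lines with the pending last_line prefixed
theorem cram_inv (ms : List (List Char)) :
    ∀ (acc : List (List Char)) (last : List Char),
      cramFinal (ms.foldl cramStep (acc, last)) = acc ++ cramParas (optCons last ms) := by
  induction ms with
  | nil =>
    intro acc last
    by_cases h : last = []
    · simp [h, cramFinal, optCons, cramParas]
    · simp [h, cramFinal, optCons, cramParas_cons_ne _ _ h, cramParas,
        PySem.Chars.join_singleton]
  | cons m rest ih =>
    intro acc last
    rw [List.foldl_cons]
    by_cases hm : m = []
    · subst hm
      rw [cramStep_nil]
      by_cases h : last = []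
      · rw [if_neg (by simp [h]), ih, h]
        simp [optCons, cramParas_cons_nil]
      · rw [if_pos (by simpa using h), ih]
        simp only [optCons, if_pos (show last ≠ [] from h), if_neg (show ¬(([] : List Char) ≠ []) by simp)]
        rw [cramParas_cons_ne _ _ h]
        simp [cramParas_cons_nil, PySem.Chars.join_singleton]
    · rw [cramStep_ne _ _ hm]
      by_cases h : last = []
      · subst h
        rw [if_neg (by simp), ih]
        simp [optCons, hm]
      · rw [if_pos (by simpa using h), ih]
        have hmm : last ++ [' '] ++ m = last ++ ' ' :: m := by simp
        rw [hmm]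
        simp only [optCons, if_pos (show last ++ ' ' :: m ≠ [] by simp),
          if_pos (show last ≠ [] from h)]
        rw [cramParas_glue last m rest h hm]

-- ===== VERDICT (by name: the statement is the Claim_ definition above) =====
theorem CramText_spec : Claim_equal_CramText := by
  intro text _
  show CramText text = CramText_alt text
  simp only [CramText, CramText_alt]
  have h1 : List.foldl cramStepA ([], []) (PySem.Chars.splitOn text.toList ['\n']) =
      List.foldl cramStep ([], [])
        ((PySem.Chars.splitOn text.toList ['\n']).map PySem.Chars.strip) := by
    rw [show cramStepA = fun st line => cramStep st (PySem.Chars.strip line) from rfl]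
    exact List.foldl_map.symm
  rw [h1]
  have h2 := cram_inv ((PySem.Chars.splitOn text.toList ['\n']).map PySem.Chars.strip) [] []
  simp only [cramFinal, optCons, if_neg (show ¬(([] : List Char) ≠ []) by simp),
    List.nil_append] at h2
  rw [h2]
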